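-- pv_equiv track=rewrite | github.com/YangSunkue/Baekjoon | 프로그래머스/0/181867. x 사이의 개수/x 사이의 개수.py | solution
-- ===== SOURCE A (Python) =====
-- def solution(my_string):
--
--     cnt = 0
--     result = []
--     for s in my_string:
--         if s != 'x':
--             cnt += 1
--         else:
--             result.append(cnt)
--             cnt = 0
--     result.append(cnt)
--
--     return result
-- ===== SOURCE B (Python) =====
-- def solution(my_string):
--     return [len(part) for part in my_string.split('x')]
-- ===== Notes on version B (the rewrite author's own statement) =====
-- stated objective: idiomatic
-- what changed: Replaces the manual per-character counter/reset loop with str.split on the separator followed by taking each segment's length.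
import Mathlib
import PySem

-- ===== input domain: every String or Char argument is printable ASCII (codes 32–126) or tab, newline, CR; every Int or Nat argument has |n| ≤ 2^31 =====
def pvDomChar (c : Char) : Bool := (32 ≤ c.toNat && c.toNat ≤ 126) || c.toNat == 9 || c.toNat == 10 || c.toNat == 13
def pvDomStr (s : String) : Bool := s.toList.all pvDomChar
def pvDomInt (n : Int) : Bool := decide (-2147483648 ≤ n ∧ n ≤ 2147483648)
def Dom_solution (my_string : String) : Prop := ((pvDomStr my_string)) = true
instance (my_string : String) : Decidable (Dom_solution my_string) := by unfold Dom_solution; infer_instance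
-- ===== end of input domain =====

-- B replaces A's per-character counter/reset loop by splitting on the separator and mapping each segment to its length (idiomatic; a timing run measured B faster by a constant factor).

-- ===== PORT A =====
-- literal port of A's loop: state (cnt, result), one step per character, final append of cnt
def solution (my_string : String) : List Int :=
  let st := my_string.toList.foldl
    (fun (acc : Int × List Int) s =>
      if s ≠ 'x' then (acc.1 + 1, acc.2) else (0, acc.2 ++ [acc.1]))
    (0, [])
  st.2 ++ [st.1]

-- ===== PORT B =====
-- my_string.split('x') → PySem.Chars.splitOn on the code points; then map len over the parts
def solution_alt (my_string : String) : List Int :=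
  (PySem.Chars.splitOn my_string.toList ['x']).map PySem.Chars.len

-- ===== PRECONDITION & SPEC =====
def Spec_solution (my_string : String) (out : List Int) : Prop := out = solution_alt my_string
instance (my_string : String) (out : List Int) : Decidable (Spec_solution my_string out) := by unfold Spec_solution; infer_instance

-- ===== CLAIM (what is proved, stated in full; the proofs are below) =====
def Claim_equal_solution : Prop := ∀ (my_string : String), Dom_solution my_string → Spec_solution my_string (solution my_string)

-- ===== LEMMAS AND PROOFS =====

-- structural recursion characterising split by a single 'x'
def splitX : List Char → List (List Char)
  | [] => [[]]
  | c :: rest => if c = 'x' then [] :: splitX rest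
                 else match splitX rest with
                      | [] => []
                      | h :: t => (c :: h) :: t

theorem splitX_ne_nil (l : List Char) : splitX l ≠ [] := by
  induction l with
  | nil => simp [splitX]
  | cons c rest ih =>
    simp only [splitX]
    split
    · simp
    · cases h : splitX rest with
      | nil => exact absurd h ih
      | cons a t => simp

theorem go_eq_splitX (fuel : Nat) (l cur : List Char) (acc : List (List Char))
    (hf : l.length ≤ fuel) :
    PySem.Chars.splitOn.go ['x'] fuel l cur acc =
      acc.reverse ++ (match splitX l with
                      | [] => []
                      | h :: t => (cur.reverse ++ h) :: t) := by
  induction fuel generalizing l cur acc with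
  | zero =>
    have : l = [] := List.eq_nil_of_length_eq_zero (Nat.le_zero.mp hf)
    subst this
    simp [PySem.Chars.splitOn.go, splitX]
  | succ n ih =>
    cases l with
    | nil => simp [PySem.Chars.splitOn.go, splitX]
    | cons c rest =>
      by_cases hc : c = 'x'
      · subst hc
        have hpre : List.isPrefixOf ['x'] ('x' :: rest) = true := by
          simp [List.isPrefixOf]
        simp only [PySem.Chars.splitOn.go, hpre, if_pos, List.length_cons,
          List.length_nil, List.drop_succ_cons, List.drop_zero]
        rw [ih rest [] (cur.reverse :: acc) (by simpa using Nat.le_of_succ_le_succ hf)]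
        cases h : splitX rest with
        | nil => exact absurd h (splitX_ne_nil rest)
        | cons a t => simp [splitX, h]
      · have hpre : List.isPrefixOf ['x'] (c :: rest) = false := by
          simp [List.isPrefixOf]
          exact fun h => absurd h.symm hc
        simp only [PySem.Chars.splitOn.go, hpre]
        rw [if_neg (by simp)]
        rw [ih rest (c :: cur) acc (by simpa using Nat.le_of_succ_le_succ hf)]
        cases h : splitX rest with
        | nil => exact absurd h (splitX_ne_nil rest)
        | cons a t => simp [splitX, h, hc]

theorem splitOn_eq_splitX (l : List Char) :
    PySem.Chars.splitOn l ['x'] = splitX l := by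
  unfold PySem.Chars.splitOn
  rw [go_eq_splitX (l.length + 1) l [] [] (Nat.le_succ _)]
  cases h : splitX l with
  | nil => exact absurd h (splitX_ne_nil l)
  | cons a t => simp

theorem fold_eq (l : List Char) (cnt : Int) (res : List Int) :
    (l.foldl
        (fun (acc : Int × List Int) s =>
          if s ≠ 'x' then (acc.1 + 1, acc.2) else (0, acc.2 ++ [acc.1]))
        (cnt, res)).2 ++ [(l.foldl
        (fun (acc : Int × List Int) s =>
          if s ≠ 'x' then (acc.1 + 1, acc.2) else (0, acc.2 ++ [acc.1]))
        (cnt, res)).1] =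
    res ++ (match (splitX l).map PySem.Chars.len with
            | [] => []
            | h :: t => (cnt + h) :: t) := by
  induction l generalizing cnt res with
  | nil => simp [splitX, PySem.Chars.len]
  | cons c rest ih =>
    by_cases hc : c = 'x'
    · subst hc
      rw [show List.foldl (fun (acc : Int × List Int) s =>
          if s ≠ 'x' then (acc.1 + 1, acc.2) else (0, acc.2 ++ [acc.1])) (cnt, res) ('x' :: rest) =
            List.foldl (fun (acc : Int × List Int) s =>
          if s ≠ 'x' then (acc.1 + 1, acc.2) else (0, acc.2 ++ [acc.1])) (0, res ++ [cnt]) rest from by simp]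
      rw [ih]
      cases h : splitX rest with
      | nil => exact absurd h (splitX_ne_nil rest)
      | cons a t => simp [splitX, h, PySem.Chars.len]
    · rw [show List.foldl (fun (acc : Int × List Int) s =>
          if s ≠ 'x' then (acc.1 + 1, acc.2) else (0, acc.2 ++ [acc.1])) (cnt, res) (c :: rest) =
            List.foldl (fun (acc : Int × List Int) s =>
          if s ≠ 'x' then (acc.1 + 1, acc.2) else (0, acc.2 ++ [acc.1])) (cnt + 1, res) rest from by simp [hc]]
      rw [ih]
      cases h : splitX rest with
      | nil => exact absurd h (splitX_ne_nil rest)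
      | cons a t =>
        simp [splitX, h, hc, PySem.Chars.len]
        ring

-- ===== VERDICT (by name: the statement is the Claim_ definition above) =====
theorem solution_spec : Claim_equal_solution := by
  intro s _
  unfold Spec_solution solution solution_alt
  simp only []
  rw [splitOn_eq_splitX, fold_eq]
  cases h : splitX s.toList with
  | nil => exact absurd h (splitX_ne_nil s.toList)
  | cons a t => simp
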